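-- pv_equiv track=rewrite | github.com/Dowlatabadi/Shrtnr | app.py | encode
-- ===== SOURCE A (Python) =====
-- alph='ABCDEFGHIJKLMNOPQRSTUVWXYZ'
--
-- def encode(input_int):
--     res=[]
--     if input_int==0:
--         return alph[0]
--     while input_int>0:
--         r=input_int%(len(alph))
--         res.append(alph[r])
--         input_int//=len(alph)
--     return ''.join(reversed(res))
-- ===== SOURCE B (Python) =====
-- alph='ABCDEFGHIJKLMNOPQRSTUVWXYZ'
--
-- def encode(input_int):
--     if input_int == 0:
--         return alph[0]
--     # find the largest power of 26 not exceeding input_int, then emit digits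
--     # most-significant-first by dividing by descending powers (no list, no reversal)
--     s = ''
--     if input_int > 0:
--         p = 1
--         while p * 26 <= input_int:
--             p *= 26
--         while p > 0:
--             s += alph[(input_int // p) % 26]
--             p //= 26
--     return s
-- ===== Notes on version B (the rewrite author's own statement) =====
-- stated objective: alternative
-- what changed: Instead of collecting remainders least-significant-first into a list and reversing it, B first finds the largest alphabet-size power not exceeding the input and then emits digits most-significant-first by dividing by descending powers, appending directly to the output string.
import Mathlib
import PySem

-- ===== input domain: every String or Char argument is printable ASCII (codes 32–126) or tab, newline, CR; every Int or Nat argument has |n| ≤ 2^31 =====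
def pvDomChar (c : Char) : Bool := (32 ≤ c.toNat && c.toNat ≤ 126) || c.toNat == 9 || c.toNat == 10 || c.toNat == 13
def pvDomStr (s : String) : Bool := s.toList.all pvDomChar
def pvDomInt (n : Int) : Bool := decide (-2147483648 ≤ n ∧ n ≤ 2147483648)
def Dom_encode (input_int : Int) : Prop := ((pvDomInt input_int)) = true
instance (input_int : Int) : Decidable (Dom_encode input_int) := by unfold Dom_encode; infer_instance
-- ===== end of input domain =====

-- B replaces A's least-significant-first remainder list plus reversed/join by finding the
-- largest power of 26 ≤ n and emitting digits most-significant-first (objective: alternative).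

-- ===== PORT A =====
def alphL : List Char := ['A','B','C','D','E','F','G','H','I','J','K','L','M','N','O','P','Q','R','S','T','U','V','W','X','Y','Z']

-- A's while loop; the index (mod n 26) is always in 0..25, so pyGetD's default is never used
def encodeGo (n : Int) (res : List Char) : List Char :=
  if _h : 0 < n then
    encodeGo (PySem.Int.floordiv n 26) (res ++ [PySem.List.pyGetD alphL (PySem.Int.mod n 26) ' '])
  else res
termination_by n.toNat
decreasing_by
  rw [PySem.Int.floordiv_eq_ediv_of_pos (by omega : (0:Int) < 26)]
  omega

def encode (input_int : Int) : String :=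
  if input_int == 0 then String.ofList [PySem.List.pyGetD alphL 0 ' ']
  else String.ofList ((encodeGo input_int []).reverse)

-- ===== PORT B =====
-- B's first loop: grow p by factors of 26 while p*26 ≤ n (the '0 < p' conjunct only
-- makes the recursion total; B always starts from p = 1, where it holds throughout)
def powLoop (n p : Int) : Int :=
  if _h : p * 26 ≤ n ∧ 0 < p then powLoop n (p * 26) else p
termination_by (n - p).toNat
decreasing_by omega

-- B's second loop: append the digit at weight p to the accumulated string, shrink p
def msbGo (n p : Int) (s : String) : String :=
  if _h : 0 < p then
    msbGo n (PySem.Int.floordiv p 26)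
      (s ++ String.ofList [PySem.List.pyGetD alphL (PySem.Int.mod (PySem.Int.floordiv n p) 26) ' '])
  else s
termination_by p.toNat
decreasing_by
  rw [PySem.Int.floordiv_eq_ediv_of_pos (by omega : (0:Int) < 26)]
  omega

def encode_alt (input_int : Int) : String :=
  if input_int == 0 then String.ofList [PySem.List.pyGetD alphL 0 ' ']
  else if 0 < input_int then msbGo input_int (powLoop input_int 1) ""
  else ""

-- ===== PRECONDITION & SPEC =====
def Spec_encode (input_int : Int) (out : String) : Prop := out = encode_alt input_int
instance (input_int : Int) (out : String) : Decidable (Spec_encode input_int out) := by unfold Spec_encode; infer_instance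

-- ===== CLAIM (what is proved, stated in full; the proofs are below) =====
def Claim_equal_encode : Prop := ∀ (input_int : Int), Dom_encode input_int → Spec_encode input_int (encode input_int)

-- ===== LEMMAS AND PROOFS =====

def dC (m : Int) : Char := PySem.List.pyGetD alphL m ' '

-- the first j least-significant base-26 digits of n
def Lfix (n : Int) : Nat → List Char
  | 0 => []
  | j+1 => dC (n % 26) :: Lfix (n / 26) j

lemma Lfix_snoc : ∀ (j : Nat) (n : Int), 0 ≤ n →
    Lfix n (j + 1) = Lfix n j ++ [dC ((n / 26 ^ j) % 26)] := by
  intro j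
  induction j with
  | zero => intro n _; simp [Lfix]
  | succ j ih =>
    intro n hn
    have h1 : (0:Int) ≤ n / 26 := by omega
    calc Lfix n (j + 2) = dC (n % 26) :: Lfix (n / 26) (j + 1) := rfl
      _ = dC (n % 26) :: (Lfix (n / 26) j ++ [dC ((n / 26 / 26 ^ j) % 26)]) := by rw [ih _ h1]
      _ = Lfix n (j + 1) ++ [dC ((n / 26 ^ (j + 1)) % 26)] := by
          rw [Int.ediv_ediv_of_nonneg (by norm_num : (0:Int) ≤ 26), ← pow_succ']
          rfl

-- A's loop keeps its accumulator as a pure prefix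
lemma encodeGo_acc : ∀ (k : Nat) (n : Int), n.toNat ≤ k → ∀ res, encodeGo n res = res ++ encodeGo n [] := by
  intro k
  induction k with
  | zero =>
    intro n h res
    have hp : ¬ 0 < n := by omega
    conv_lhs => rw [encodeGo]
    conv_rhs => rw [encodeGo]
    rw [dif_neg hp, dif_neg hp, List.append_nil]
  | succ k ih =>
    intro n h res
    conv_lhs => rw [encodeGo]
    conv_rhs => rw [encodeGo]
    by_cases hp : 0 < n
    · rw [dif_pos hp, dif_pos hp]
      have hd : (PySem.Int.floordiv n 26).toNat ≤ k := by
        rw [PySem.Int.floordiv_eq_ediv_of_pos (by omega : (0:Int) < 26)]; omega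
      rw [ih _ hd (res ++ [PySem.List.pyGetD alphL (PySem.Int.mod n 26) ' ']),
          ih _ hd ([] ++ [PySem.List.pyGetD alphL (PySem.Int.mod n 26) ' '])]
      simp
    · rw [dif_neg hp, dif_neg hp, List.append_nil]

-- A's digit list is the fixed-length LSB-first digit list, when n has exactly j+1 digits
lemma encodeGo_eq_Lfix : ∀ (j : Nat) (n : Int), (26:Int) ^ j ≤ n → n < 26 ^ (j + 1) →
    encodeGo n [] = Lfix n (j + 1) := by
  intro j
  induction j with
  | zero =>
    intro n h1 h2
    simp only [pow_zero] at h1 h2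
    rw [encodeGo, dif_pos (by omega : (0:Int) < n), encodeGo_acc 0 _ (by
      rw [PySem.Int.floordiv_eq_ediv_of_pos (by omega : (0:Int) < 26)]; omega)]
    rw [encodeGo, dif_neg (by
      rw [PySem.Int.floordiv_eq_ediv_of_pos (by omega : (0:Int) < 26)]; omega)]
    simp [Lfix, dC]
  | succ j ih =>
    intro n h1 h2
    have hp26 : (0:Int) < 26 ^ (j + 1) := by positivity
    have hpj : (0:Int) < 26 ^ j := by positivity
    have hn : (0:Int) < n := by omega
    have hb1 : (26:Int) ^ j ≤ n / 26 := by
      rw [Int.le_ediv_iff_mul_le (by omega : (0:Int) < 26), ← pow_succ]; exact h1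
    have hb2 : n / 26 < 26 ^ (j + 1) := by
      rw [Int.ediv_lt_iff_lt_mul (by omega : (0:Int) < 26), ← pow_succ]; exact h2
    have hfd : PySem.Int.floordiv n 26 = n / 26 :=
      PySem.Int.floordiv_eq_ediv_of_pos (by omega : (0:Int) < 26)
    rw [encodeGo, dif_pos hn, encodeGo_acc n.toNat _ (by rw [hfd]; omega)]
    rw [hfd, ih _ hb1 hb2]
    simp [Lfix, dC]

-- B's second loop keeps its accumulator as a pure prefix
lemma msbGo_acc : ∀ (k : Nat) (n p : Int), p.toNat ≤ k → ∀ s, msbGo n p s = s ++ msbGo n p "" := by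
  intro k
  induction k with
  | zero =>
    intro n p h s
    have hp : ¬ 0 < p := by omega
    conv_lhs => rw [msbGo]
    conv_rhs => rw [msbGo]
    rw [dif_neg hp, dif_neg hp]
    simp
  | succ k ih =>
    intro n p h s
    conv_lhs => rw [msbGo]
    conv_rhs => rw [msbGo]
    by_cases hp : 0 < p
    · rw [dif_pos hp, dif_pos hp]
      have hd : (PySem.Int.floordiv p 26).toNat ≤ k := by
        rw [PySem.Int.floordiv_eq_ediv_of_pos (by omega : (0:Int) < 26)]; omega
      rw [ih _ _ hd, ih _ _ hd ("" ++ _)]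
      simp [String.append_assoc]
    · rw [dif_neg hp, dif_neg hp]; simp

-- B's emission loop from weight 26^j produces the reverse of the LSB digit list
lemma msbGo_eq : ∀ (j : Nat) (n : Int), 0 ≤ n →
    msbGo n ((26:Int) ^ j) "" = String.ofList ((Lfix n (j + 1)).reverse) := by
  intro j
  induction j with
  | zero =>
    intro n hn
    rw [msbGo, dif_pos (by norm_num : (0:Int) < 26 ^ 0)]
    rw [msbGo, dif_neg (by
      rw [PySem.Int.floordiv_eq_ediv_of_pos (by omega : (0:Int) < 26)]; norm_num)]
    simp [Lfix, dC]
  | succ j ih =>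
    intro n hn
    have hpj : (0:Int) < 26 ^ (j + 1) := by positivity
    have hdiv : PySem.Int.floordiv ((26:Int) ^ (j + 1)) 26 = 26 ^ j := by
      rw [PySem.Int.floordiv_eq_ediv_of_pos (by omega : (0:Int) < 26), pow_succ,
        Int.mul_ediv_cancel _ (by omega : (26:Int) ≠ 0)]
    rw [msbGo, dif_pos hpj, hdiv,
      msbGo_acc ((26:Int) ^ j).toNat _ _ le_rfl, ih _ hn,
      Lfix_snoc (j + 1) n hn, List.reverse_append]
    simp [dC]
    rw [← String.ofList_append]
    rfl

-- B's first loop, started at 26^j ≤ n, returns the largest power of 26 not exceeding n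
lemma powLoop_spec : ∀ (fuel : Nat) (j : Nat) (n : Int), (n - 26 ^ j).toNat ≤ fuel →
    (26:Int) ^ j ≤ n → ∃ k : Nat, powLoop n ((26:Int) ^ j) = 26 ^ k ∧
      (26:Int) ^ k ≤ n ∧ n < 26 ^ (k + 1) := by
  intro fuel
  induction fuel with
  | zero =>
    intro j n h hle
    have hpj : (0:Int) < 26 ^ j := by positivity
    have hng : ¬ ((26:Int) ^ j * 26 ≤ n ∧ 0 < (26:Int) ^ j) := by
      intro ⟨hg, _⟩; omega
    rw [powLoop, dif_neg hng]
    exact ⟨j, rfl, hle, by rw [pow_succ]; omega⟩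
  | succ fuel ih =>
    intro j n h hle
    have hpj : (0:Int) < 26 ^ j := by positivity
    by_cases hg : (26:Int) ^ j * 26 ≤ n
    · rw [powLoop, dif_pos ⟨hg, hpj⟩, ← pow_succ]
      have hle' : (26:Int) ^ (j + 1) ≤ n := by rw [pow_succ]; exact hg
      have hpj1 : (0:Int) < 26 ^ (j + 1) := by positivity
      have hlt : (26:Int) ^ j < 26 ^ (j + 1) := by rw [pow_succ]; omega
      exact ih (j + 1) n (by omega) hle'
    · rw [powLoop, dif_neg (by intro ⟨hg', _⟩; exact hg hg')]
      exact ⟨j, rfl, hle, by rw [pow_succ]; omega⟩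

-- ===== VERDICT (by name: the statement is the Claim_ definition above) =====
theorem encode_spec : Claim_equal_encode := by
  intro n _
  unfold Spec_encode encode encode_alt
  by_cases h0 : n == 0
  · rw [if_pos h0, if_pos h0]
  · rw [if_neg h0, if_neg h0]
    by_cases hp : 0 < n
    · rw [if_pos hp]
      obtain ⟨k, hpl, hk1, hk2⟩ := powLoop_spec (n - 1).toNat 0 n (by omega)
        (by simpa using (by omega : (1:Int) ≤ n))
      rw [show (1:Int) = 26 ^ 0 by norm_num, hpl, msbGo_eq k n (by omega),
        encodeGo_eq_Lfix k n hk1 hk2]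
    · rw [if_neg hp]
      have hneg : n < 0 := by
        rcases lt_trichotomy n 0 with h | h | h
        · exact h
        · exact absurd (by simp [h]) h0
        · exact absurd h hp
      rw [encodeGo, dif_neg hp]
      rfl
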